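-- pv_equiv track=rewrite | github.com/Maj1n777/dependency-visualizer | graph_visualizer.py | generate_ascii_tree
-- ===== SOURCE A (Python) =====
-- from typing import Dict, List, Set
--
-- def generate_ascii_tree(graph: Dict[str, List[str]], start_package: str) -> str:
--     lines = []
--
--     def build_tree(node, prefix="", is_last=True):
--         connector = "└── " if is_last else "├── "
--         lines.append(prefix + connector + node)
--
--         if node in graph:
--             children = graph[node]
--             new_prefix = prefix + ("    " if is_last else "│   ")
--             for i, child in enumerate(children):
--                 is_last_child = i == len(children) - 1
--                 build_tree(child, new_prefix, is_last_child)
--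
--     lines.append("ДЕРЕВО ЗАВИСИМОСТЕЙ:")
--     lines.append("=" * 40)
--     build_tree(start_package)
--     return "\n".join(lines)
-- ===== SOURCE B (Python) =====
-- def generate_ascii_tree(graph, start_package):
--     # Bottom-up decomposition: render each subtree as a self-contained block of
--     # lines, then prefix child blocks, instead of threading the full prefix
--     # top-down through a recursive closure with a shared accumulator.
--     def render(node):
--         block = [node]
--         children = graph.get(node, [])
--         n = len(children)
--         for i, child in enumerate(children):
--             sub = render(child)
--             if i == n - 1:
--                 block.append("└── " + sub[0])
--                 block.extend("    " + line for line in sub[1:])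
--             else:
--                 block.append("├── " + sub[0])
--                 block.extend("│   " + line for line in sub[1:])
--         return block
--     sub = render(start_package)
--     lines = ["ДЕРЕВО ЗАВИСИМОСТЕЙ:", "=" * 40, "└── " + sub[0]]
--     lines.extend("    " + line for line in sub[1:])
--     return "\n".join(lines)
-- ===== Notes on version B (the rewrite author's own statement) =====
-- stated objective: alternative
-- what changed: Replaces the top-down recursive closure that threads the accumulated prefix and appends to one shared lines list with a bottom-up renderer that returns each subtree as a self-contained block of lines and decorates/prefixes child blocks after the recursive call.
import Mathlib
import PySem

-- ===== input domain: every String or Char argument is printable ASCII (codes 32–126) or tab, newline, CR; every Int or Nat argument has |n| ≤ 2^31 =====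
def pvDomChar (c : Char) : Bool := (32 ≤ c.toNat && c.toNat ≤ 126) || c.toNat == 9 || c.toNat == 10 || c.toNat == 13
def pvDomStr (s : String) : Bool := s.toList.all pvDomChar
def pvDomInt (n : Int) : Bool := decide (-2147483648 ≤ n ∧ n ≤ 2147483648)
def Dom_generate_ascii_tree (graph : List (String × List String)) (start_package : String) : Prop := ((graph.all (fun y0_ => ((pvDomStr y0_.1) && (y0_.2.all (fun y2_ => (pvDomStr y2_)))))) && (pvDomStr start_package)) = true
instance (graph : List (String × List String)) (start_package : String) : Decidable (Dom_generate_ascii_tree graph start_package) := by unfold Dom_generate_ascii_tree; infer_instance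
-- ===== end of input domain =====

-- B differs from A by a different decomposition: A threads the full prefix top-down through a
-- recursive closure appending to one shared lines list; B renders each subtree bottom-up as a
-- self-contained block of lines and prefixes child blocks afterwards ("alternative" objective).

-- ===== PORT A =====
-- A's recursive build_tree, with a fuel counter as a pure totality guard (Python recursion
-- depth); Pre_ guarantees the fuel graph.length + 1 is never exhausted.
mutual
def pvBuildA (graph : List (String × List String)) : Nat → String → String → Bool → List String
  | 0, _, _, _ => []
  | f+1, node, pre, isLast =>
    let line := pre ++ (if isLast then "└── " else "├── ") ++ node
    match PySem.Dict.get? (PySem.Dict.mk graph) node with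
    | none => [line]
    | some children =>
      let np := pre ++ (if isLast then "    " else "│   ")
      line :: pvChildrenA graph f np children
  termination_by f node pre isLast => (f, 0)
def pvChildrenA (graph : List (String × List String)) (f : Nat) (np : String) : List String → List String
  | [] => []
  | c :: rest => pvBuildA graph f c np rest.isEmpty ++ pvChildrenA graph f np rest
  termination_by cs => (f, cs.length + 1)
end

def generate_ascii_tree (graph : List (String × List String)) (start_package : String) : String :=
  PySem.Str.join "\n"
    ("ДЕРЕВО ЗАВИСИМОСТЕЙ:" :: "========================================" ::
      pvBuildA graph (graph.length + 1) start_package "" true)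

-- ===== PORT B =====
-- decorate a rendered subtree block: connector on its head line, continuation on its tail lines
def pvDeco (isLast : Bool) : List String → List String
  | [] => []
  | h :: t =>
    ((if isLast then "└── " else "├── ") ++ h)
      :: t.map (fun line => (if isLast then "    " else "│   ") ++ line)

mutual
def pvRenderB (graph : List (String × List String)) : Nat → String → List String
  | 0, _ => []
  | f+1, node =>
    node ::
      (match PySem.Dict.get? (PySem.Dict.mk graph) node with
       | none => []
       | some children => pvBlockB graph f children)
  termination_by f node => (f, 0)
def pvBlockB (graph : List (String × List String)) (f : Nat) : List String → List String
  | [] => []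
  | c :: rest => pvDeco rest.isEmpty (pvRenderB graph f c) ++ pvBlockB graph f rest
  termination_by cs => (f, cs.length + 1)
end

def generate_ascii_tree_alt (graph : List (String × List String)) (start_package : String) : String :=
  PySem.Str.join "\n"
    ("ДЕРЕВО ЗАВИСИМОСТЕЙ:" :: "========================================" ::
      pvDeco true (pvRenderB graph (graph.length + 1) start_package))

-- ===== PRECONDITION & SPEC =====
-- helpers for Pre_: children of a node, one-step expansion of a node set, bounded reachability
def pvKids (graph : List (String × List String)) (node : String) : List String :=
  (PySem.Dict.get? (PySem.Dict.mk graph) node).getD []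
def pvExpand (graph : List (String × List String)) (s : List String) : List String :=
  (s ++ s.flatMap (pvKids graph)).dedup
def pvReach (graph : List (String × List String)) (s : List String) : List String :=
  (pvExpand graph)^[graph.length + 1] s
-- Pre_ excludes exactly the graphs with a cycle reachable from start_package: there A's
-- unbounded recursion raises RecursionError (it never returns a value).
def Pre_generate_ascii_tree (graph : List (String × List String)) (start_package : String) : Prop :=
  (pvReach graph [start_package]).all
    (fun x => !(pvReach graph (pvKids graph x)).contains x) = true
instance (graph : List (String × List String)) (start_package : String) : Decidable (Pre_generate_ascii_tree graph start_package) := by unfold Pre_generate_ascii_tree; infer_instance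
def pvWitness_generate_ascii_tree : (List (String × List String)) × String :=
  ([("a", ["b", "c"]), ("b", ["d"])], "a")

def Spec_generate_ascii_tree (graph : List (String × List String)) (start_package : String) (out : String) : Prop := out = generate_ascii_tree_alt graph start_package
instance (graph : List (String × List String)) (start_package : String) (out : String) : Decidable (Spec_generate_ascii_tree graph start_package out) := by unfold Spec_generate_ascii_tree; infer_instance

-- ===== CLAIM (what is proved, stated in full; the proofs are below) =====
def Claim_equal_generate_ascii_tree : Prop := ∀ (graph : List (String × List String)) (start_package : String), Dom_generate_ascii_tree graph start_package → Pre_generate_ascii_tree graph start_package → Spec_generate_ascii_tree graph start_package (generate_ascii_tree graph start_package)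

-- ===== LEMMAS AND PROOFS =====
theorem pvDeco_map (pre : String) (isLast : Bool) (l : List String) :
    (pvDeco isLast l).map (fun line => pre ++ line)
      = match l with
        | [] => []
        | h :: t => (pre ++ (if isLast then "└── " else "├── ") ++ h)
            :: t.map (fun line => (pre ++ (if isLast then "    " else "│   ")) ++ line) := by
  cases l with
  | nil => simp [pvDeco]
  | cons h t =>
    simp [pvDeco, List.map_map, Function.comp, String.append_assoc]

theorem pvChildren_of_build (graph : List (String × List String)) (f : Nat)
    (hb : ∀ node pre isLast, pvBuildA graph f node pre isLast
        = (pvDeco isLast (pvRenderB graph f node)).map (fun line => pre ++ line)) :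
    ∀ np cs, pvChildrenA graph f np cs
        = (pvBlockB graph f cs).map (fun line => np ++ line) := by
  intro np cs
  induction cs with
  | nil => simp [pvChildrenA, pvBlockB]
  | cons c rest ih =>
    rw [pvChildrenA, pvBlockB, List.map_append, ih, hb c np rest.isEmpty]

theorem pvBuild_eq_render (graph : List (String × List String)) :
    ∀ (f : Nat) (node pre : String) (isLast : Bool),
      pvBuildA graph f node pre isLast
        = (pvDeco isLast (pvRenderB graph f node)).map (fun line => pre ++ line) := by
  intro f
  induction f with
  | zero => intro node pre isLast; simp [pvBuildA, pvRenderB, pvDeco]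
  | succ f ih =>
    intro node pre isLast
    rw [pvBuildA, pvRenderB]
    cases h : PySem.Dict.get? (PySem.Dict.mk graph) node with
    | none => simp [pvDeco_map]
    | some children =>
      simp only [pvDeco_map]
      rw [pvChildren_of_build graph f ih]

theorem map_empty_append (l : List String) : l.map (fun line => "" ++ line) = l := by
  simp

-- ===== VERDICT (by name: the statement is the Claim_ definition above) =====
theorem generate_ascii_tree_spec : Claim_equal_generate_ascii_tree := by
  intro graph start_package _ _
  unfold Spec_generate_ascii_tree generate_ascii_tree generate_ascii_tree_alt
  rw [pvBuild_eq_render, map_empty_append]
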